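-- pv_equiv track=rewrite | github.com/siwonpawel/msk | teeth.py | cluster_info
-- ===== SOURCE A (Python) =====
-- def cluster_info(clusterdict):
--     drops_total = 0
--     drops_flow0_only = 0
--     drops_flow1_only = 0
--     for cluster, count in clusterdict.items():
--         drops_total += count
--         (f0, f1) = cluster
--         if (f0 == 0): drops_flow1_only += count
--         if (f1 == 0): drops_flow0_only += count
--     return (drops_total, drops_flow0_only, drops_flow1_only, '"' + dict2string(clusterdict) + '"')
--
-- def dict2string(dict):
--     s = str(dict)
--     s = s.replace(' ', '')
--     return s
-- ===== SOURCE B (Python) =====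
-- def cluster_info(clusterdict):
--     drops_total = sum(clusterdict.values())
--     drops_flow0_only = sum(c for (f0, f1), c in clusterdict.items() if f1 == 0)
--     drops_flow1_only = sum(c for (f0, f1), c in clusterdict.items() if f0 == 0)
--     body = ','.join('(%d,%d):%d' % (f0, f1, c) for (f0, f1), c in clusterdict.items())
--     return (drops_total, drops_flow0_only, drops_flow1_only, '"{' + body + '}"')
-- ===== Notes on version B (the rewrite author's own statement) =====
-- stated objective: idiomatic
-- what changed: A's single loop that accumulates three counters at once is replaced by three independent aggregate scans (sum of values, and two filtered sums), and the serialization no longer goes through str(dict) followed by global space removal but formats each (f0,f1):count item directly and joins with commas.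
import Mathlib
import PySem

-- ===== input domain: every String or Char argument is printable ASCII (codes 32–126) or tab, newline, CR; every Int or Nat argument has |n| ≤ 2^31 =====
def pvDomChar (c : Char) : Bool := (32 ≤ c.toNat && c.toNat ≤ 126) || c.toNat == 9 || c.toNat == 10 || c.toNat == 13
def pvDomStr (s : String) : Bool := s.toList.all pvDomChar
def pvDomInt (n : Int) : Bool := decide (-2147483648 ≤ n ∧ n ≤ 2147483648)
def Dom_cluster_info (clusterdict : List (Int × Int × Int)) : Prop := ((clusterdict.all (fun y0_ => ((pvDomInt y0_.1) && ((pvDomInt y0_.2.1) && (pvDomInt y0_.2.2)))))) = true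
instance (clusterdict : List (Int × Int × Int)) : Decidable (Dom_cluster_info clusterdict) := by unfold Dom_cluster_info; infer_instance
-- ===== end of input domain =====

-- B replaces A's single accumulating loop by three independent aggregate scans and serializes
-- the dict directly item by item instead of str(dict) followed by space removal (objective: idiomatic).

-- ===== PORT A =====
-- str(dict) for this key/value shape, ported by hand on List Char (exact for dict[(int,int),int];
-- Lean's own String concatenation is opaque to the kernel, so concatenation is done on char lists)
def pvItemReprA (x : Int × Int × Int) : List Char :=
  '(' :: PySem.Int.toChars x.1 ++ [',', ' '] ++ PySem.Int.toChars x.2.1 ++ [')', ':', ' '] ++ PySem.Int.toChars x.2.2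

def dict2string (clusterdict : List (Int × Int × Int)) : List Char :=
  let s := '{' :: PySem.Chars.join [',', ' '] (clusterdict.map pvItemReprA) ++ ['}']
  PySem.Chars.replace s [' '] []

def cluster_info (clusterdict : List (Int × Int × Int)) : Int × Int × Int × String :=
  let st := clusterdict.foldl (fun (acc : Int × Int × Int) x =>
      let total := acc.1 + x.2.2
      let f1only := if x.1 == 0 then acc.2.2 + x.2.2 else acc.2.2
      let f0only := if x.2.1 == 0 then acc.2.1 + x.2.2 else acc.2.1
      (total, f0only, f1only)) (0, 0, 0)
  (st.1, st.2.1, st.2.2, String.ofList ('"' :: dict2string clusterdict ++ ['"']))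

-- ===== PORT B =====
def pvItemB (x : Int × Int × Int) : List Char :=
  '(' :: PySem.Int.toChars x.1 ++ [','] ++ PySem.Int.toChars x.2.1 ++ [')', ':'] ++ PySem.Int.toChars x.2.2

def cluster_info_alt (clusterdict : List (Int × Int × Int)) : Int × Int × Int × String :=
  let drops_total := (clusterdict.map (fun x => x.2.2)).sum
  let drops_flow0_only := ((clusterdict.filter (fun x => x.2.1 == 0)).map (fun x => x.2.2)).sum
  let drops_flow1_only := ((clusterdict.filter (fun x => x.1 == 0)).map (fun x => x.2.2)).sum
  let body := PySem.Chars.join [','] (clusterdict.map pvItemB)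
  (drops_total, drops_flow0_only, drops_flow1_only, String.ofList ('"' :: '{' :: body ++ ['}', '"']))

-- ===== PRECONDITION & SPEC =====
def Spec_cluster_info (clusterdict : List (Int × Int × Int)) (out : Int × Int × Int × String) : Prop := out = cluster_info_alt clusterdict
instance (clusterdict : List (Int × Int × Int)) (out : Int × Int × Int × String) : Decidable (Spec_cluster_info clusterdict out) := by unfold Spec_cluster_info; infer_instance

-- ===== CLAIM (what is proved, stated in full; the proofs are below) =====
def Claim_equal_cluster_info : Prop := ∀ (clusterdict : List (Int × Int × Int)), Dom_cluster_info clusterdict → Spec_cluster_info clusterdict (cluster_info clusterdict)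

-- ===== LEMMAS AND PROOFS =====
lemma replace_go_space (fuel : Nat) (l acc : List Char) (h : l.length ≤ fuel) :
    PySem.Chars.replace.go [' '] [] fuel l acc = acc.reverse ++ l.filter (fun c => c != ' ') := by
  induction fuel generalizing l acc with
  | zero =>
    have : l = [] := List.eq_nil_of_length_eq_zero (Nat.le_zero.mp h)
    subst this; simp [PySem.Chars.replace.go]
  | succ fuel ih =>
    cases l with
    | nil => simp [PySem.Chars.replace.go]
    | cons c t =>
      by_cases hc : c = ' '
      · subst hc
        have : ([' '].isPrefixOf (' ' :: t)) = true := by simp [List.isPrefixOf]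
        simp only [PySem.Chars.replace.go, this, if_pos]
        rw [ih] <;> simp_all
      · have : ([' '].isPrefixOf (c :: t)) = false := by
          simp [List.isPrefixOf]; exact fun hh => hc hh.symm
        simp only [PySem.Chars.replace.go, this]
        rw [if_neg (by simp), ih t (c :: acc) (by simpa using Nat.lt_succ_iff.mp (by simpa using h))]
        simp [hc]

lemma replace_space_eq_filter (s : List Char) :
    PySem.Chars.replace s [' '] [] = s.filter (fun c => c != ' ') := by
  rw [PySem.Chars.replace]
  simp only [List.isEmpty_cons, Bool.false_eq_true, if_false]
  exact replace_go_space s.length s [] le_rfl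

lemma digitChar_ne_space (n : Nat) : Nat.digitChar n ≠ ' ' := by
  rcases Nat.lt_or_ge n 16 with h | h
  · interval_cases n <;> decide
  · have h16 : Nat.digitChar n = '*' := by
      unfold Nat.digitChar
      repeat rw [if_neg (by omega)]
    rw [h16]; decide

lemma space_notin_toDigitsCore (b fuel n : Nat) (ds : List Char) (hds : ' ' ∉ ds) :
    ' ' ∉ Nat.toDigitsCore b fuel n ds := by
  induction fuel generalizing n ds with
  | zero => simpa [Nat.toDigitsCore] using hds
  | succ fuel ih =>
    rw [Nat.toDigitsCore]
    split
    · intro hmem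
      rcases List.mem_cons.mp hmem with h | h
      · exact digitChar_ne_space _ h.symm
      · exact hds h
    · exact ih _ _ (by
        intro hmem
        rcases List.mem_cons.mp hmem with h | h
        · exact digitChar_ne_space _ h.symm
        · exact hds h)

lemma filter_toChars (n : Int) :
    (PySem.Int.toChars n).filter (fun c => c != ' ') = PySem.Int.toChars n := by
  apply List.filter_eq_self.mpr
  intro c hc
  rw [PySem.Int.toChars] at hc
  have hne : c ≠ ' ' := by
    split at hc
    · rcases List.mem_cons.mp hc with h | h
      · subst h; decide
      · exact fun he => space_notin_toDigitsCore 10 _ _ [] (by simp) (he ▸ h)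
    · exact fun he => space_notin_toDigitsCore 10 _ _ [] (by simp) (he ▸ hc)
  simpa using hne

lemma filter_item (x : Int × Int × Int) :
    (pvItemReprA x).filter (fun c => c != ' ') = pvItemB x := by
  simp [pvItemReprA, pvItemB, List.filter_append, filter_toChars]

lemma filter_join_items (l : List (Int × Int × Int)) :
    (PySem.Chars.join [',', ' '] (l.map pvItemReprA)).filter (fun c => c != ' ')
      = PySem.Chars.join [','] (l.map pvItemB) := by
  induction l with
  | nil => simp [PySem.Chars.join_nil]
  | cons x xs ih =>
    cases xs with
    | nil => simp [PySem.Chars.join_singleton, filter_item]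
    | cons y ys =>
      simp only [List.map_cons] at ih ⊢
      rw [PySem.Chars.join_cons_cons, PySem.Chars.join_cons_cons,
          List.filter_append, List.filter_append, ih, filter_item]
      simp

lemma string_sides_eq (l : List (Int × Int × Int)) :
    dict2string l = '{' :: PySem.Chars.join [','] (l.map pvItemB) ++ ['}'] := by
  show PySem.Chars.replace ('{' :: PySem.Chars.join [',', ' '] (l.map pvItemReprA) ++ ['}']) [' '] []
      = _
  rw [replace_space_eq_filter]
  simp [List.filter_append, filter_join_items]

lemma foldl_sums (l : List (Int × Int × Int)) (a b c : Int) :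
    l.foldl (fun (acc : Int × Int × Int) x =>
      let total := acc.1 + x.2.2
      let f1only := if x.1 == 0 then acc.2.2 + x.2.2 else acc.2.2
      let f0only := if x.2.1 == 0 then acc.2.1 + x.2.2 else acc.2.1
      (total, f0only, f1only)) (a, b, c)
    = (a + (l.map (fun x => x.2.2)).sum,
       b + ((l.filter (fun x => x.2.1 == 0)).map (fun x => x.2.2)).sum,
       c + ((l.filter (fun x => x.1 == 0)).map (fun x => x.2.2)).sum) := by
  induction l generalizing a b c with
  | nil => simp
  | cons x xs ih =>
    simp only [List.foldl_cons, List.filter_cons, List.map_cons, List.sum_cons, ih]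
    by_cases h0 : x.1 = 0 <;> by_cases h1 : x.2.1 = 0 <;>
      simp [h0, h1, Prod.ext_iff] <;> ring_nf <;> simp

-- ===== VERDICT (by name: the statement is the Claim_ definition above) =====
theorem cluster_info_spec : Claim_equal_cluster_info := by
  intro l _
  show cluster_info l = cluster_info_alt l
  unfold cluster_info cluster_info_alt
  rw [foldl_sums, string_sides_eq]
  simp
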